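-- pv_equiv track=rewrite | github.com/pypi-data/pypi-mirror-349 | packages/cthulhucrypt/cthulhucrypt-0.2.6-py3-none-any.whl/cthulhucrypt/core.py | rev_xor_shift
-- ===== SOURCE A (Python) =====
-- def rev_xor_shift(text, key=0x55AA, reverse=False):
--     key_bytes = key.to_bytes(2, 'big')
--     if not reverse:
--         # XOR but keep as characters
--         out = []
--         for i, c in enumerate(text):
--             val = ord(c) ^ key_bytes[i % 2]
--             out.append(chr(val))
--         return ''.join(out)
--     else:
--         # Input is characters, XOR directly
--         chars = []
--         for i, c in enumerate(text):
--             val = ord(c) ^ key_bytes[i % 2]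
--             chars.append(chr(val))
--         return ''.join(chars)
-- ===== SOURCE B (Python) =====
-- def rev_xor_shift(text, key=0x55AA, reverse=False):
--     b0, b1 = key.to_bytes(2, 'big')
--     out = []
--     it = iter(text)
--     for even_ch in it:
--         out.append(chr(ord(even_ch) ^ b0))
--         odd_ch = next(it, None)
--         if odd_ch is not None:
--             out.append(chr(ord(odd_ch) ^ b1))
--     return ''.join(out)
-- ===== Notes on version B (the rewrite author's own statement) =====
-- stated objective: alternative
-- what changed: Replaced the enumerate/index-parity loop (with its duplicated reverse/non-reverse branches) by a single two-at-a-time pass that consumes a character pair per step, XORing the first with the high key byte and the second with the low byte, so no index or modulus is computed at all.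
import Mathlib
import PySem

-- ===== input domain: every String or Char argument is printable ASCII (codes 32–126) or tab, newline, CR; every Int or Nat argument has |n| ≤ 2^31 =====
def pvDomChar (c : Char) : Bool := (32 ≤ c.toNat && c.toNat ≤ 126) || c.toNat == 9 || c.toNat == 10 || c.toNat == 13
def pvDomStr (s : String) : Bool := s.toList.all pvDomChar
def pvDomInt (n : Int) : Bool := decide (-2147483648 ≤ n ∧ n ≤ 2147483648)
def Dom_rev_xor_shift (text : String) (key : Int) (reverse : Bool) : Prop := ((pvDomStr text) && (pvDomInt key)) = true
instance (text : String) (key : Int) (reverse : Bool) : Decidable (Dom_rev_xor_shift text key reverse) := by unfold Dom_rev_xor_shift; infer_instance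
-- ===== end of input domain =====

-- B changes the decomposition (two-at-a-time pass, one code path, no index arithmetic); same O(n) cost.
-- ===== PORT A =====
def pvAByte (keyBytes : List Nat) (i : Int) : Nat :=
  keyBytes.getD (PySem.Int.mod i 2).toNat 0

def rev_xor_shift (text : String) (key : Int) (reverse : Bool) : String :=
  -- key.to_bytes(2, big-endian); within Pre_ (0 ≤ key < 65536) these are the two big-endian bytes
  let keyBytes : List Nat := [key.toNat / 256, key.toNat % 256]
  if !reverse then
    let out := (PySem.List.enumerate text.toList 0).foldl
      (fun out ic => out ++ [Char.ofNat (Nat.xor ic.2.toNat (pvAByte keyBytes ic.1))]) []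
    String.mk out
  else
    let chars := (PySem.List.enumerate text.toList 0).foldl
      (fun chars ic => chars ++ [Char.ofNat (Nat.xor ic.2.toNat (pvAByte keyBytes ic.1))]) []
    String.mk chars

-- ===== PORT B =====
-- two-at-a-time loop: first of the pair XORed with b0, second (if any) with b1
def pvPairXor (b0 b1 : Nat) : List Char → List Char
  | [] => []
  | [e] => [Char.ofNat (Nat.xor e.toNat b0)]
  | e :: o :: rest =>
      Char.ofNat (Nat.xor e.toNat b0) :: Char.ofNat (Nat.xor o.toNat b1) :: pvPairXor b0 b1 rest

def rev_xor_shift_alt (text : String) (key : Int) (reverse : Bool) : String :=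
  let b0 := key.toNat / 256
  let b1 := key.toNat % 256
  String.mk (pvPairXor b0 b1 text.toList)

-- ===== PRECONDITION & SPEC =====
-- Pre_ excludes exactly the inputs where key.to_bytes(2,'big') raises OverflowError (key < 0 or key >= 2^16).
def Pre_rev_xor_shift (text : String) (key : Int) (reverse : Bool) : Prop := 0 ≤ key ∧ key < 65536
instance (text : String) (key : Int) (reverse : Bool) : Decidable (Pre_rev_xor_shift text key reverse) := by unfold Pre_rev_xor_shift; infer_instance
def pvWitness_rev_xor_shift : String × Int × Bool := ("ab", 21930, false)
def Spec_rev_xor_shift (text : String) (key : Int) (reverse : Bool) (out : String) : Prop := out = rev_xor_shift_alt text key reverse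
instance (text : String) (key : Int) (reverse : Bool) (out : String) : Decidable (Spec_rev_xor_shift text key reverse out) := by unfold Spec_rev_xor_shift; infer_instance

-- ===== CLAIM (what is proved, stated in full; the proofs are below) =====
def Claim_equal_rev_xor_shift : Prop := ∀ (text : String) (key : Int) (reverse : Bool), Dom_rev_xor_shift text key reverse → Pre_rev_xor_shift text key reverse → Spec_rev_xor_shift text key reverse (rev_xor_shift text key reverse)

-- ===== LEMMAS AND PROOFS =====

theorem pvMod2 (s : Int) : PySem.Int.mod s 2 = s % 2 := by
  simp [PySem.Int.mod, Int.fmod_eq_emod]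

-- alternating map: applies f to the head, then swaps the roles of f and g
def pvAltMap (f g : Char → Char) : List Char → List Char
  | [] => []
  | c :: t => f c :: pvAltMap g f t

theorem pvFoldAppend (h : Int × Char → Char) :
    ∀ (l : List (Int × Char)) (acc : List Char),
      l.foldl (fun out ic => out ++ [h ic]) acc = acc ++ l.map h := by
  intro l
  induction l with
  | nil => simp
  | cons x t ih => intro acc; simp [List.foldl, ih]

-- key_bytes[i % 2] is the first byte at even i, the second at odd i
theorem pvAByteEq (b0 b1 : Nat) (i : Int) :
    pvAByte [b0, b1] i = if PySem.Int.mod i 2 = 0 then b0 else b1 := by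
  have h : i % 2 = 0 ∨ i % 2 = 1 := by omega
  rcases h with h | h <;> simp only [pvAByte, pvMod2, h] <;> norm_num

-- mapping over enumerate with an index-parity choice is pvAltMap, the starting
-- role decided by the parity of the start index
theorem pvEnumMap (f g : Char → Char) :
    ∀ (l : List Char) (s : Int),
      (PySem.List.enumerate l s).map
          (fun ic => if PySem.Int.mod ic.1 2 = 0 then f ic.2 else g ic.2)
        = if PySem.Int.mod s 2 = 0 then pvAltMap f g l else pvAltMap g f l := by
  intro l
  induction l with
  | nil => intro s; simp [PySem.List.enumerate_nil, pvAltMap]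
  | cons c t ih =>
    intro s
    have hmod : PySem.Int.mod s 2 = 0 ∨ PySem.Int.mod s 2 = 1 := by rw [pvMod2]; omega
    have hsucc : PySem.Int.mod s 2 = 0 → PySem.Int.mod (s + 1) 2 = 1 := by
      rw [pvMod2, pvMod2]; omega
    have hsucc' : PySem.Int.mod s 2 = 1 → PySem.Int.mod (s + 1) 2 = 0 := by
      rw [pvMod2, pvMod2]; omega
    rcases hmod with h0 | h1
    · simp only [PySem.List.enumerate_cons, List.map_cons, ih (s + 1), h0, hsucc h0,
        pvAltMap]
      simp
    · simp only [PySem.List.enumerate_cons, List.map_cons, ih (s + 1), h1, hsucc' h1,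
        pvAltMap]
      simp

theorem pvPairXorCons :
    ∀ (l : List Char) (b0 b1 : Nat) (c : Char),
      pvPairXor b0 b1 (c :: l)
        = Char.ofNat (Nat.xor c.toNat b0) :: pvPairXor b1 b0 l := by
  intro l
  induction l with
  | nil => intro b0 b1 c; simp [pvPairXor]
  | cons o t ih =>
    intro b0 b1 c
    rw [ih b1 b0 o]
    simp only [pvPairXor]

-- pvAltMap with the two XOR maps is exactly the two-at-a-time pass of B
theorem pvAltEqPair :
    ∀ (l : List Char) (b0 b1 : Nat),
      pvAltMap (fun c => Char.ofNat (Nat.xor c.toNat b0))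
               (fun c => Char.ofNat (Nat.xor c.toNat b1)) l = pvPairXor b0 b1 l := by
  intro l
  induction l with
  | nil => intro b0 b1; simp [pvAltMap, pvPairXor]
  | cons c t ih =>
    intro b0 b1
    rw [pvPairXorCons]
    simp only [pvAltMap]
    rw [ih b1 b0]

theorem pvCore (b0 b1 : Nat) (l : List Char) :
    (PySem.List.enumerate l 0).map
        (fun ic => Char.ofNat (Nat.xor ic.2.toNat (pvAByte [b0, b1] ic.1)))
      = pvPairXor b0 b1 l := by
  have hfun : (fun ic : Int × Char => Char.ofNat (Nat.xor ic.2.toNat (pvAByte [b0, b1] ic.1)))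
      = fun ic : Int × Char =>
          if PySem.Int.mod ic.1 2 = 0
          then (fun c => Char.ofNat (Nat.xor c.toNat b0)) ic.2
          else (fun c => Char.ofNat (Nat.xor c.toNat b1)) ic.2 := by
    funext ic
    rw [pvAByteEq]
    split <;> rfl
  rw [hfun]
  refine (pvEnumMap (fun c => Char.ofNat (Nat.xor c.toNat b0))
      (fun c => Char.ofNat (Nat.xor c.toNat b1)) l 0).trans ?_
  rw [if_pos (by rw [pvMod2]; rfl : PySem.Int.mod 0 2 = 0), pvAltEqPair l b0 b1]

-- ===== VERDICT (by name: the statement is the Claim_ definition above) =====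
theorem rev_xor_shift_spec : Claim_equal_rev_xor_shift := by
  intro text key reverse _ _
  unfold Spec_rev_xor_shift rev_xor_shift rev_xor_shift_alt
  cases reverse <;>
  · simp only [Bool.not_false, Bool.not_true, if_true, if_false, Bool.false_eq_true]
    rw [pvFoldAppend]
    simp only [List.nil_append]
    rw [pvCore]
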